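-- pv_equiv track=rewrite | github.com/deveshpat/Ouroboros | train_sft.py | _extract_chat_pair
-- ===== SOURCE A (Python) =====
-- from typing import Any, Dict, List, Optional, Tuple
--
-- def _extract_chat_pair(turns: Any) -> Tuple[str, str]:
--     """Extract the first user/human prompt and first assistant/gpt reply from a chat-style list."""
--     question = ""
--     assistant_blob = ""
--     for turn in (turns or []):
--         role = str(turn.get("role") or turn.get("from") or "").lower().strip()
--         value = str(turn.get("content") or turn.get("value") or "").strip()
--         if role in {"user", "human"} and value and not question:
--             question = value
--         elif role in {"assistant", "gpt"} and value and not assistant_blob: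
--             assistant_blob = value
--     return question, assistant_blob
-- ===== SOURCE B (Python) =====
-- from typing import Any, Tuple
--
--
-- def _norm_role(turn) -> str:
--     return str(turn.get("role") or turn.get("from") or "").lower().strip()
--
--
-- def _norm_value(turn) -> str:
--     return str(turn.get("content") or turn.get("value") or "").strip()
--
--
-- def _first_value(ts, roles) -> str:
--     return next((_norm_value(t) for t in ts
--                  if _norm_role(t) in roles and _norm_value(t)), "")
--
--
-- def _extract_chat_pair(turns: Any) -> Tuple[str, str]:
--     """Two independent first-match scans instead of one flag-guarded pass."""
--     ts = list(turns or [])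
--     return (_first_value(ts, {"user", "human"}),
--             _first_value(ts, {"assistant", "gpt"}))
-- ===== Notes on version B (the rewrite author's own statement) =====
-- stated objective: simpler
-- what changed: Replaced the single stateful pass with two flag variables by materializing the turns once and doing two independent first-match scans (one per role set), each returning the first nonempty normalized value.
import Mathlib
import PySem

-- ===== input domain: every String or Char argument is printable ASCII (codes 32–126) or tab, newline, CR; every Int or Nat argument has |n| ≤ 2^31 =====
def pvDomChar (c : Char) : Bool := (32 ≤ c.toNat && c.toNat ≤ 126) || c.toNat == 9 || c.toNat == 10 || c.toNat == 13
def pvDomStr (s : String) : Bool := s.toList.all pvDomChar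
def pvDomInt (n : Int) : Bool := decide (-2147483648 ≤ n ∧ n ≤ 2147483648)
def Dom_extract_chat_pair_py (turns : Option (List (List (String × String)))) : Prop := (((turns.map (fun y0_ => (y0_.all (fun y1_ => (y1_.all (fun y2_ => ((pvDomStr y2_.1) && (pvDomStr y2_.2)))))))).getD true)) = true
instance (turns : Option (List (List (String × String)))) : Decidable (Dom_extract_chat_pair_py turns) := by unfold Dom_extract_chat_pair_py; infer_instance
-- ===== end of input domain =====

-- B replaces A's single flag-guarded pass with two independent first-match scans (simpler decomposition, same O(n) cost).


-- ===== PORT A =====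
-- shared normalization helpers (the same Python expressions appear verbatim in Source A and Source B):
-- `turn.get(k1) or turn.get(k2) or ""` — a missing key and a stored "" are both falsy, so getD "" is exact
def pvOrGet (t : List (String × String)) (k1 k2 : String) : String :=
  let v1 := ((PySem.Dict.mk t).get? k1).getD ""
  if v1 ≠ "" then v1 else ((PySem.Dict.mk t).get? k2).getD ""

-- str(turn.get("role") or turn.get("from") or "").lower().strip()
def pvNormRole (t : List (String × String)) : String :=
  PySem.Str.strip (PySem.Str.lower (pvOrGet t "role" "from"))

-- str(turn.get("content") or turn.get("value") or "").strip()
def pvNormValue (t : List (String × String)) : String :=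
  PySem.Str.strip (pvOrGet t "content" "value")

-- A's loop, carrying the two flag variables question/assistant_blob
def pvLoopA : List (List (String × String)) → String → String → String × String
  | [], q, b => (q, b)
  | t :: rest, q, b =>
    let role := pvNormRole t
    let value := pvNormValue t
    if (role = "user" ∨ role = "human") ∧ value ≠ "" ∧ q = "" then
      pvLoopA rest value b
    else if (role = "assistant" ∨ role = "gpt") ∧ value ≠ "" ∧ b = "" then
      pvLoopA rest q value
    else
      pvLoopA rest q b

def extract_chat_pair_py (turns : Option (List (List (String × String)))) : String × String :=
  pvLoopA (turns.getD []) "" ""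

-- ===== PORT B =====
-- first nonempty normalized value among turns whose normalized role lies in `roles` (Source B's _first_value)
def pvFirstValue (ts : List (List (String × String))) (roles : List String) : String :=
  ((ts.find? (fun t => roles.contains (pvNormRole t) && (pvNormValue t != ""))).map pvNormValue).getD ""

def extract_chat_pair_py_alt (turns : Option (List (List (String × String)))) : String × String :=
  let ts := turns.getD []
  (pvFirstValue ts ["user", "human"], pvFirstValue ts ["assistant", "gpt"])

-- ===== PRECONDITION & SPEC =====
def Spec_extract_chat_pair_py (turns : Option (List (List (String × String)))) (out : String × String) : Prop := out = extract_chat_pair_py_alt turns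
instance (turns : Option (List (List (String × String)))) (out : String × String) : Decidable (Spec_extract_chat_pair_py turns out) := by unfold Spec_extract_chat_pair_py; infer_instance

-- ===== CLAIM (what is proved, stated in full; the proofs are below) =====
def Claim_equal_extract_chat_pair_py : Prop := ∀ (turns : Option (List (List (String × String)))), Dom_extract_chat_pair_py turns → Spec_extract_chat_pair_py turns (extract_chat_pair_py turns)

-- ===== LEMMAS AND PROOFS =====
lemma pvFirstValue_cons (t : List (String × String)) (ts : List (List (String × String))) (roles : List String) :
    pvFirstValue (t :: ts) roles =
      if roles.contains (pvNormRole t) && (pvNormValue t != "") then pvNormValue t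
      else pvFirstValue ts roles := by
  simp only [pvFirstValue, List.find?_cons]
  split <;> simp_all

lemma pvLoopA_eq (ts : List (List (String × String))) : ∀ q b : String,
    pvLoopA ts q b =
      ((if q = "" then pvFirstValue ts ["user", "human"] else q),
       (if b = "" then pvFirstValue ts ["assistant", "gpt"] else b)) := by
  induction ts with
  | nil => intro q b; simp [pvLoopA, pvFirstValue]
  | cons t rest ih =>
    intro q b
    simp only [pvLoopA, pvFirstValue_cons, ih]
    by_cases hu : pvNormRole t = "user" ∨ pvNormRole t = "human" <;>
      by_cases ha : pvNormRole t = "assistant" ∨ pvNormRole t = "gpt" <;>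
      by_cases hv : pvNormValue t = "" <;>
      by_cases hq : q = "" <;>
      by_cases hb : b = "" <;>
      simp_all <;>
      rcases hu with h | h <;> rcases ha with h' | h' <;> simp_all

-- ===== VERDICT (by name: the statement is the Claim_ definition above) =====
theorem extract_chat_pair_py_spec : Claim_equal_extract_chat_pair_py := by
  intro turns _
  show _ = _
  simp [extract_chat_pair_py, extract_chat_pair_py_alt, pvLoopA_eq]
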